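-- pv_equiv track=rewrite | github.com/patrick-llgc/HackerRank | Melodious_Password.py | get_pswd
-- ===== SOURCE A (Python) =====
-- def get_pswd(n):
--     """Returns a password consisting of vowels and consonants in alternating order"""
--     vowels = ['a', 'e', 'i', 'o', 'u']
--     consonants = [chr(i) for i in range(ord('a'), ord('z')+1) if chr(i) not in vowels and chr(i) != 'y']
--
--     pswd = vowels + consonants
--     if n == 1:
--         return pswd
--     for i in range(2, n + 1):
--         t_pswd = []
--         for p in pswd:
--             if p[-1] in vowels:
--                 newp = [p+c for c in consonants]
--             else:
--                 newp = [p+c for c in vowels]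
--             t_pswd.extend(newp)
--         pswd = t_pswd
--     return pswd
-- ===== SOURCE B (Python) =====
-- def get_pswd(n):
--     """Returns a password consisting of vowels and consonants in alternating order"""
--     vowels = ['a', 'e', 'i', 'o', 'u']
--     consonants = [c for c in map(chr, range(97, 123)) if c not in vowels and c != 'y']
--     if n < 2:
--         return vowels + consonants
--     def block(classes):
--         res = ['']
--         for cls in classes:
--             res = [s + c for s in res for c in cls]
--         return res
--     pat_v = [vowels if i % 2 == 0 else consonants for i in range(n)]
--     pat_c = [consonants if i % 2 == 0 else vowels for i in range(n)]
--     return block(pat_v) + block(pat_c)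
-- ===== Notes on version B (the rewrite author's own statement) =====
-- stated objective: idiomatic
-- what changed: A grows one interleaved list by inspecting each password's last character at every step; B instead builds two independent itertools.product-style blocks (vowel-start, then consonant-start) from precomputed alternating class patterns and concatenates them.
import Mathlib
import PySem

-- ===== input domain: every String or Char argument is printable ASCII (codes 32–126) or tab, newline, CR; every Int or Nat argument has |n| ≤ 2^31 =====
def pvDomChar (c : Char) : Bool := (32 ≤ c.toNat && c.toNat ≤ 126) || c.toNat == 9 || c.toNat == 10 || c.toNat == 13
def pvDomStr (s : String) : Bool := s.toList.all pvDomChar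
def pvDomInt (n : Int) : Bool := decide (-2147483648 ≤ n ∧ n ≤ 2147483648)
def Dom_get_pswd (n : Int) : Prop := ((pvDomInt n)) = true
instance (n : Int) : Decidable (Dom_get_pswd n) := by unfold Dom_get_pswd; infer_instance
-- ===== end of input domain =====

-- B replaces A's per-string last-character inspection by two independent product-style blocks over
-- precomputed alternating class patterns (vowel-start block, then consonant-start block); objective: idiomatic.
-- Passwords are carried as List Char (Python str on code points, exact) and packed with String.ofList at the end.

-- ===== PORT A =====
def pvVowels : List Char := ['a', 'e', 'i', 'o', 'u']
def pvConsonants : List Char :=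
  ((PySem.List.pyRange 97 123 1).map (fun i => Char.ofNat i.toNat)).filter
    (fun c => !pvVowels.contains c && c != 'y')
-- one iteration of A's outer loop: t_pswd = []; for p in pswd: t_pswd.extend(newp)
-- (p[-1] is PySem.List.pyGet? p (-1); it is never none here since every p is nonempty,
--  and `(…).any` is exactly `p[-1] in vowels` then)
def pvStepA (pswd : List (List Char)) : List (List Char) :=
  pswd.foldl (fun t p =>
    t ++ (if (PySem.List.pyGet? p (-1)).any (fun c => pvVowels.contains c)
          then pvConsonants.map (fun c => p ++ [c])
          else pvVowels.map (fun c => p ++ [c]))) []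

def get_pswd (n : Int) : List String :=
  let base : List (List Char) := pvVowels.map (fun c => [c]) ++ pvConsonants.map (fun c => [c])
  if n == 1 then base.map (fun p => String.ofList p)
  else ((PySem.List.pyRange 2 (n + 1) 1).foldl (fun pswd _ => pvStepA pswd) base).map
        (fun p => String.ofList p)

-- ===== PORT B =====
def pvVowelsB : List Char := ['a', 'e', 'i', 'o', 'u']
def pvConsonantsB : List Char :=
  ((PySem.List.pyRange 97 123 1).map (fun i => Char.ofNat i.toNat)).filter
    (fun c => !pvVowelsB.contains c && c != 'y')
-- block(classes): res = ['']; for cls in classes: res = [s + c for s in res for c in cls]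
def pvBlock (classes : List (List Char)) : List (List Char) :=
  classes.foldl (fun res cls => res.flatMap (fun s => cls.map (fun c => s ++ [c]))) [[]]

def get_pswd_alt (n : Int) : List String :=
  if n < 2 then (pvVowelsB ++ pvConsonantsB).map (fun c => String.ofList [c])
  else
    let patV := (PySem.List.pyRange 0 n 1).map
      (fun i => if PySem.Int.mod i 2 == 0 then pvVowelsB else pvConsonantsB)
    let patC := (PySem.List.pyRange 0 n 1).map
      (fun i => if PySem.Int.mod i 2 == 0 then pvConsonantsB else pvVowelsB)
    (pvBlock patV ++ pvBlock patC).map (fun p => String.ofList p)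

-- ===== PRECONDITION & SPEC =====
def Spec_get_pswd (n : Int) (out : List String) : Prop := out = get_pswd_alt n
instance (n : Int) (out : List String) : Decidable (Spec_get_pswd n out) := by unfold Spec_get_pswd; infer_instance

-- ===== CLAIM (what is proved, stated in full; the proofs are below) =====
def Claim_equal_get_pswd : Prop := ∀ (n : Int), Dom_get_pswd n → Spec_get_pswd n (get_pswd n)

-- ===== LEMMAS AND PROOFS =====

-- alternating class pattern starting with X, as a Nat-indexed list (proof-side mirror of B's patterns)
def pvAlt (X Y : List Char) (m : Nat) : List (List Char) :=
  (List.range m).map (fun i => if i % 2 = 0 then X else Y)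

theorem pvAlt_succ (X Y : List Char) (m : Nat) :
    pvAlt X Y (m + 1) = pvAlt X Y m ++ [if m % 2 = 0 then X else Y] := by
  simp [pvAlt, List.range_succ]

theorem pvBlock_snoc (cs : List (List Char)) (cls : List Char) :
    pvBlock (cs ++ [cls]) = (pvBlock cs).flatMap (fun s => cls.map (fun c => s ++ [c])) := by
  simp [pvBlock, List.foldl_append]

theorem pvStepA_eq_flatMap (l : List (List Char)) :
    pvStepA l = l.flatMap (fun p =>
      if (PySem.List.pyGet? p (-1)).any (fun c => pvVowels.contains c)
      then pvConsonants.map (fun c => p ++ [c])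
      else pvVowels.map (fun c => p ++ [c])) := by
  rw [pvStepA, PySem.List.foldl_append_eq_flatMap, List.nil_append]

theorem pvStepA_append (a b : List (List Char)) :
    pvStepA (a ++ b) = pvStepA a ++ pvStepA b := by
  simp [pvStepA_eq_flatMap]

set_option maxRecDepth 100000 in
theorem pvCval : pvConsonants = ['b','c','d','f','g','h','j','k','l','m','n','p','q','r','s','t','v','w','x','z'] := by rfl

theorem pvVC : ∀ c ∈ pvConsonants, pvVowels.contains c = false := by
  rw [pvCval]; intro c hc; fin_cases hc <;> decide

theorem pvVneC : pvVowels ≠ pvConsonants := by rw [pvCval]; decide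

-- one step of A's loop on a finished block: every string ends with a char of cls,
-- so A extends the whole block by the opposite class
theorem pvStepA_block (cs : List (List Char)) (cls : List Char)
    (h : cls = pvVowels ∨ cls = pvConsonants) :
    pvStepA (pvBlock (cs ++ [cls])) =
      pvBlock ((cs ++ [cls]) ++ [if cls = pvVowels then pvConsonants else pvVowels]) := by
  rw [pvStepA_eq_flatMap, pvBlock_snoc (cs ++ [cls])]
  apply List.flatMap_congr
  intro p hp
  rw [pvBlock_snoc cs, List.mem_flatMap] at hp
  obtain ⟨s, hs, hp⟩ := hp
  rw [List.mem_map] at hp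
  obtain ⟨c, hc, rfl⟩ := hp
  rw [PySem.List.pyGet?_neg_one_append_singleton]
  rcases h with rfl | rfl
  · simp [hc]
  · have hnc : c ∉ pvVowels := by simpa using pvVC c hc
    simp [hnc, Ne.symm pvVneC]

-- foldl with a body that ignores the element is iteration
theorem pvFoldl_ignore {α β : Type} (g : α → α) (l : List β) (init : α) :
    l.foldl (fun a _ => g a) init = g^[l.length] init := by
  induction l generalizing init with
  | nil => rfl
  | cons x xs ih => simp [List.foldl_cons, ih, Function.iterate_succ_apply]

theorem pvStepA_alt (X Y : List Char)
    (hXY : (X = pvVowels ∧ Y = pvConsonants) ∨ (X = pvConsonants ∧ Y = pvVowels)) (m : Nat) :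
    pvStepA (pvBlock (pvAlt X Y (m + 1))) = pvBlock (pvAlt X Y (m + 2)) := by
  rw [pvAlt_succ X Y m, pvStepA_block _ _ (by rcases hXY with ⟨rfl, rfl⟩ | ⟨rfl, rfl⟩ <;> by_cases hm : m % 2 = 0 <;> simp [hm])]
  rw [show m + 2 = (m + 1) + 1 from rfl, pvAlt_succ X Y (m + 1), pvAlt_succ X Y m]
  rcases hXY with ⟨rfl, rfl⟩ | ⟨rfl, rfl⟩ <;> by_cases hm : m % 2 = 0
  · have hm1 : (m + 1) % 2 = 1 := by omega
    simp [hm, hm1]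
  · have hm1 : (m + 1) % 2 = 0 := by omega
    simp [hm, hm1, Ne.symm pvVneC]
  · have hm1 : (m + 1) % 2 = 1 := by omega
    simp [hm, hm1, Ne.symm pvVneC]
  · have hm1 : (m + 1) % 2 = 0 := by omega
    simp [hm, hm1]

theorem pvMain (m : Nat) :
    pvStepA^[m] (pvVowels.map (fun c => [c]) ++ pvConsonants.map (fun c => [c])) =
      pvBlock (pvAlt pvVowels pvConsonants (m + 1)) ++ pvBlock (pvAlt pvConsonants pvVowels (m + 1)) := by
  induction m with
  | zero => simp [pvAlt, pvBlock, List.range_succ]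
  | succ m ih =>
      rw [Function.iterate_succ_apply', ih, pvStepA_append,
        pvStepA_alt _ _ (Or.inl ⟨rfl, rfl⟩) m, pvStepA_alt _ _ (Or.inr ⟨rfl, rfl⟩) m]

theorem pvPat_eq (X Y : List Char) (k : Nat) :
    (PySem.List.pyRange 0 (k : Int) 1).map
      (fun i => if PySem.Int.mod i 2 == 0 then X else Y) = pvAlt X Y k := by
  rw [PySem.List.pyRange_one, List.map_map]
  simp only [Int.sub_zero, Int.toNat_natCast, pvAlt]
  apply List.map_congr_left
  intro a _
  by_cases h : a % 2 = 0
  · have h' : (2 : Int) ∣ (a : Int) := by omega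
    simp [h, h']
  · have h' : ¬ (2 : Int) ∣ (a : Int) := by omega
    simp [h, h']

-- ===== VERDICT (by name: the statement is the Claim_ definition above) =====
theorem get_pswd_spec : Claim_equal_get_pswd := by
  intro n _
  show get_pswd n = get_pswd_alt n
  simp only [get_pswd, get_pswd_alt]
  by_cases h2 : n < 2
  · simp only [if_pos h2]
    by_cases h1 : n = 1
    · simp [h1, pvVowelsB, pvConsonantsB, pvVowels, pvConsonants, List.map_map, Function.comp]
    · have : (n == 1) = false := by simp [h1]
      rw [this, if_neg (by simp), PySem.List.pyRange_one_eq_nil (by omega)]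
      simp [pvVowelsB, pvConsonantsB, pvVowels, pvConsonants, List.map_map, Function.comp]
  · have hn : ¬ n = 1 := by omega
    have : (n == 1) = false := by simp [hn]
    rw [this, if_neg (by simp), if_neg h2]
    obtain ⟨k, rfl⟩ : ∃ k : Nat, n = (k : Int) := ⟨n.toNat, by omega⟩
    have hk : 2 ≤ k := by omega
    rw [pvFoldl_ignore, PySem.List.length_pyRange_one]
    have hlen : ((k : Int) + 1 - 2).toNat = (k - 2) + 1 := by omega
    rw [hlen, pvMain (k - 2 + 1)]
    have hk2 : (k - 2 + 1) + 1 = k := by omega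
    rw [hk2, pvPat_eq, pvPat_eq]
    simp only [show pvVowelsB = pvVowels from rfl, show pvConsonantsB = pvConsonants from rfl]
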